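-- pv_equiv track=rewrite | github.com/cr625/proethica | app/services/extraction/principles.py | _clean_principle_label
-- ===== SOURCE A (Python) =====
-- def _clean_principle_label(label: str) -> str:
--     """Clean up a principle label to be more atomic."""
--     # Remove articles and common words
--     stopwords = {'the', 'a', 'an', 'of', 'in', 'to', 'for', 'with', 'on', 'at', 'by'}
--     words = label.split()
--
--     # Filter out stopwords except when they're essential (like "of" in "Code of Ethics")
--     cleaned_words = []
--     for i, word in enumerate(words):
--         if word.lower() not in stopwords or (i > 0 and i < len(words) - 1):
--             cleaned_words.append(word)
--
--     cleaned = ' '.join(cleaned_words)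
--
--     # Ensure proper capitalization
--     if cleaned:
--         # Title case for multi-word principles
--         if ' ' in cleaned:
--             cleaned = ' '.join(word.capitalize() for word in cleaned.split())
--         else:
--             # Single words - capitalize first letter
--             cleaned = cleaned[0].upper() + cleaned[1:] if len(cleaned) > 1 else cleaned.upper()
--
--     return cleaned
-- ===== SOURCE B (Python) =====
-- def _clean_principle_label(label: str) -> str:
--     """Clean up a principle label to be more atomic."""
--     stopwords = {'the', 'a', 'an', 'of', 'in', 'to', 'for', 'with', 'on', 'at', 'by'}
--     words = label.split()
--     # Only the endpoints can be removed: trim a stopword off each end.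
--     if words and words[-1].lower() in stopwords:
--         words = words[:-1]
--     if words and words[0].lower() in stopwords:
--         words = words[1:]
--     if not words:
--         return ''
--     if len(words) > 1:
--         return ' '.join(w.capitalize() for w in words)
--     w = words[0]
--     return w[0].upper() + w[1:] if len(w) > 1 else w.upper()
-- ===== Notes on version B (the rewrite author's own statement) =====
-- stated objective: simpler
-- what changed: B replaces A's indexed filter loop over all words (keeping interior words via an index test) with two endpoint trims on the word list, and capitalizes the kept words directly instead of joining, re-testing for a space and re-splitting as A does.
import Mathlib
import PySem

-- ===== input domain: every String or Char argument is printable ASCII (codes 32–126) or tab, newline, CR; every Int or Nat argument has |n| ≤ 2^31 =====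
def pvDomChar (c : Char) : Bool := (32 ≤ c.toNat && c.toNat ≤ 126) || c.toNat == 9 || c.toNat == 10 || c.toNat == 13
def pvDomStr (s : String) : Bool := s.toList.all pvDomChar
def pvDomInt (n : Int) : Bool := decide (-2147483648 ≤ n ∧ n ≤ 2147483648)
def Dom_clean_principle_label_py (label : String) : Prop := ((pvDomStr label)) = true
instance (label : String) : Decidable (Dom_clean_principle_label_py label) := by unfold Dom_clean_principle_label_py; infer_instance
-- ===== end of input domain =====

-- B replaces A's indexed filter over all words with two endpoint trims and capitalizes the
-- kept words directly instead of joining, re-testing for a space and re-splitting (objective: simpler).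

-- shared data/helpers (both Python versions contain the same stopword set and capitalization expressions)
def pvStop : List String := ["the", "a", "an", "of", "in", "to", "for", "with", "on", "at", "by"]

-- word.capitalize(): exact on ASCII (Python titlecases the first char, = upper on ASCII)
def pvCapitalize (s : String) : String :=
  String.ofList (match s.toList with
    | [] => []
    | c :: cs => PySem.Chars.upperChar c :: cs.map PySem.Chars.lowerChar)

-- cleaned[0].upper() + cleaned[1:], used only on nonempty strings; exact on ASCII
def pvUpperFirst (s : String) : String :=
  String.ofList (match s.toList with
    | [] => []
    | c :: cs => PySem.Chars.upperChar c :: cs)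

-- ===== PORT A =====
def clean_principle_label_py (label : String) : String :=
  let words := PySem.Str.split₀ label
  let cleaned_words := (PySem.List.enumerate words).foldl
    (fun acc iw =>
      if ¬ (pvStop.contains (PySem.Str.lower iw.2) = true) ∨ (0 < iw.1 ∧ iw.1 < (words.length : Int) - 1)
      then acc ++ [iw.2] else acc) []
  let cleaned := PySem.Str.join " " cleaned_words
  if cleaned = "" then cleaned
  else if PySem.Str.isIn " " cleaned then
    PySem.Str.join " " ((PySem.Str.split₀ cleaned).map pvCapitalize)
  else if 1 < PySem.Str.len cleaned then pvUpperFirst cleaned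
  else PySem.Str.upper cleaned

-- ===== PORT B =====
-- final phase of B: empty / single word / multi word (Source B's three returns)
def pvFinish (words : List String) : String :=
  match words with
  | [] => ""
  | [w] => if 1 < PySem.Str.len w then pvUpperFirst w else PySem.Str.upper w
  | ws => PySem.Str.join " " (ws.map pvCapitalize)

def clean_principle_label_py_alt (label : String) : String :=
  let words0 := PySem.Str.split₀ label
  let words1 :=
    if h : words0 ≠ [] then
      if pvStop.contains (PySem.Str.lower (words0.getLast h)) then
        PySem.List.slice words0 none (some (-1))
      else words0
    else words0
  let words2 :=
    if h : words1 ≠ [] then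
      if pvStop.contains (PySem.Str.lower (words1.head h)) then
        PySem.List.slice words1 (some 1) none
      else words1
    else words1
  pvFinish words2

-- ===== PRECONDITION & SPEC =====
def Spec_clean_principle_label_py (label : String) (out : String) : Prop := out = clean_principle_label_py_alt label
instance (label : String) (out : String) : Decidable (Spec_clean_principle_label_py label out) := by unfold Spec_clean_principle_label_py; infer_instance

-- ===== CLAIM (what is proved, stated in full; the proofs are below) =====
def Claim_equal_clean_principle_label_py : Prop := ∀ (label : String), Dom_clean_principle_label_py label → Spec_clean_principle_label_py label (clean_principle_label_py label)

-- ===== LEMMAS AND PROOFS =====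

theorem go_nil (cur acc) : PySem.Chars.split₀.go [] cur acc = if cur.isEmpty then acc.reverse else (cur.reverse :: acc).reverse := by
  simp [PySem.Chars.split₀.go]

theorem go_nonspace (c rest cur acc) (h : PySem.Chars.isspace c = false) :
    PySem.Chars.split₀.go (c :: rest) cur acc = PySem.Chars.split₀.go rest (c :: cur) acc := by
  rw [PySem.Chars.split₀.go]; simp [h]

theorem go_space (rest cur acc) :
    PySem.Chars.split₀.go (' ' :: rest) cur acc =
      if cur.isEmpty then PySem.Chars.split₀.go rest [] acc else PySem.Chars.split₀.go rest [] (cur.reverse :: acc) := by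
  rw [PySem.Chars.split₀.go]
  have : PySem.Chars.isspace ' ' = true := by decide
  simp [this]

theorem go_word (w : List Char) (hw : ∀ c ∈ w, PySem.Chars.isspace c = false) :
    ∀ s cur acc, PySem.Chars.split₀.go (w ++ s) cur acc = PySem.Chars.split₀.go s (w.reverse ++ cur) acc := by
  induction w with
  | nil => intro s cur acc; simp
  | cons c t ih =>
    intro s cur acc
    rw [List.cons_append, go_nonspace _ _ _ _ (hw c (by simp)), ih (fun x hx => hw x (by simp [hx]))]
    simp

theorem go_join (ws : List (List Char))
    (h : ∀ w ∈ ws, w ≠ [] ∧ ∀ c ∈ w, PySem.Chars.isspace c = false) :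
    ∀ acc, PySem.Chars.split₀.go (PySem.Chars.join [' '] ws) [] acc = acc.reverse ++ ws := by
  induction ws with
  | nil => intro acc; simp [PySem.Chars.join, List.intercalate, go_nil]
  | cons w rest ih =>
    intro acc
    obtain ⟨hne, hns⟩ := h w (by simp)
    cases rest with
    | nil =>
      rw [PySem.Chars.join_singleton, show w = w ++ [] from by simp, go_word w hns, go_nil]
      simp [List.isEmpty_iff, hne]
    | cons v rest' =>
      rw [PySem.Chars.join_cons_cons, List.append_assoc, go_word w hns, List.singleton_append,
        go_space]
      simp only [List.append_nil, List.isEmpty_iff, List.reverse_eq_nil_iff]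
      rw [if_neg hne]
      have := ih (fun x hx => h x (by simp [hx])) (w.reverse.reverse :: acc)
      simpa using this

theorem go_space' (c rest cur acc) (hc : PySem.Chars.isspace c = true) :
    PySem.Chars.split₀.go (c :: rest) cur acc =
      if cur.isEmpty then PySem.Chars.split₀.go rest [] acc else PySem.Chars.split₀.go rest [] (cur.reverse :: acc) := by
  rw [PySem.Chars.split₀.go]; simp [hc]

theorem go_words (s : List Char) :
    ∀ (cur : List Char) (accs : List (List Char)),
    (∀ w ∈ accs, w ≠ [] ∧ ∀ c ∈ w, PySem.Chars.isspace c = false) →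
    (∀ c ∈ cur, PySem.Chars.isspace c = false) →
    ∀ w ∈ PySem.Chars.split₀.go s cur accs, w ≠ [] ∧ ∀ c ∈ w, PySem.Chars.isspace c = false := by
  induction s with
  | nil =>
    intro cur accs hacc hcur w hw
    rw [go_nil] at hw
    by_cases hc : cur.isEmpty
    · rw [if_pos hc] at hw; exact hacc w (by simpa using hw)
    · rw [if_neg hc] at hw
      simp only [List.mem_reverse, List.mem_cons] at hw
      rcases hw with h1 | h2
      · subst h1
        refine ⟨by simpa [List.isEmpty_iff] using hc, fun c hc' => hcur c (by simpa using hc')⟩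
      · exact hacc w h2
  | cons c rest ih =>
    intro cur accs hacc hcur w hw
    by_cases hc : PySem.Chars.isspace c = true
    · rw [go_space' _ _ _ _ hc] at hw
      by_cases he : cur.isEmpty
      · rw [if_pos he] at hw; exact ih [] accs hacc (by simp) w hw
      · rw [if_neg he] at hw
        refine ih [] (cur.reverse :: accs) ?_ (by simp) w hw
        intro v hv
        rcases List.mem_cons.mp hv with h1 | h2
        · subst h1
          exact ⟨by simpa [List.isEmpty_iff] using he, fun d hd => hcur d (by simpa using hd)⟩
        · exact hacc v h2
    · rw [go_nonspace _ _ _ _ (by simpa using hc)] at hw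
      refine ih (c :: cur) accs hacc ?_ w hw
      intro d hd
      rcases List.mem_cons.mp hd with h1 | h2
      · subst h1; simpa using hc
      · exact hcur d h2

theorem foldl_mid {α : Type} (P : α → Bool) (n : Int) (mid : List α) (b : α) :
    ∀ (s : Int) (acc : List α), 1 ≤ s → s + mid.length = n - 1 →
    (PySem.List.enumerate (mid ++ [b]) s).foldl
      (fun acc iw => if ¬ (P iw.2 = true) ∨ (0 < iw.1 ∧ iw.1 < n - 1) then acc ++ [iw.2] else acc) acc
      = acc ++ mid ++ (if P b then [] else [b]) := by
  induction mid with
  | nil =>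
    intro s acc hs hn
    simp only [List.length_nil, Nat.cast_zero, add_zero] at hn
    rw [List.nil_append, PySem.List.enumerate_cons]
    have he : PySem.List.enumerate ([] : List α) (s + 1) = [] := by simp [PySem.List.enumerate]
    rw [he, List.foldl_cons, List.foldl_nil]
    by_cases hb : P b = true
    · rw [if_neg]
      · simp [hb]
      · simp [hb]; omega
    · rw [if_pos]
      · simp [hb]
      · simp [hb]
  | cons m rest ih =>
    intro s acc hs hn
    rw [List.cons_append, PySem.List.enumerate_cons, List.foldl_cons]
    rw [if_pos]
    · have := ih (s + 1) (acc ++ [m]) (by omega) (by simp at hn ⊢; omega)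
      rw [this]; simp
    · right; constructor
      · omega
      · simp at hn; omega

theorem split0_join (ws : List (List Char))
    (h : ∀ w ∈ ws, w ≠ [] ∧ ∀ c ∈ w, PySem.Chars.isspace c = false) :
    PySem.Chars.split₀ (PySem.Chars.join [' '] ws) = ws := by
  have := go_join ws h []
  simpa [PySem.Chars.split₀] using this

theorem split0_words (s : String) :
    ∀ w ∈ PySem.Str.split₀ s, w.toList ≠ [] ∧ ∀ c ∈ w.toList, PySem.Chars.isspace c = false := by
  intro w hw
  have hm : w.toList ∈ PySem.Chars.split₀ s.toList := by
    rw [← PySem.Str.split₀_map_toList]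
    exact List.mem_map_of_mem hw
  exact go_words s.toList [] [] (by simp) (by simp) w.toList hm

theorem toList_injective' : Function.Injective String.toList := fun a b h => String.toList_inj.mp h

theorem phase2 (kept : List String)
    (hk : ∀ w ∈ kept, w.toList ≠ [] ∧ ∀ c ∈ w.toList, PySem.Chars.isspace c = false) :
    (let cleaned := PySem.Str.join " " kept
     if cleaned = "" then cleaned
     else if PySem.Str.isIn " " cleaned then
       PySem.Str.join " " ((PySem.Str.split₀ cleaned).map pvCapitalize)
     else if 1 < PySem.Str.len cleaned then pvUpperFirst cleaned
     else PySem.Str.upper cleaned)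
    = pvFinish kept := by
  unfold pvFinish
  match kept with
  | [] => rfl
  | [w] =>
    obtain ⟨hne, hns⟩ := hk w (by simp)
    have hjw : PySem.Str.join " " [w] = w := by
      apply String.toList_inj.mp
      rw [PySem.Str.toList_join]
      simp [PySem.Chars.join_singleton]
    show (if PySem.Str.join " " [w] = "" then _ else _) = _
    rw [hjw]
    have hwne : ¬ (w = "") := by
      intro h; exact hne (by simp [h])
    rw [if_neg hwne]
    have hnoin : PySem.Str.isIn " " w = false := by
      rw [Bool.eq_false_iff]
      intro h
      have hinf := (PySem.Str.isIn_iff_infix _ _).mp h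
      have : ' ' ∈ w.toList := (List.singleton_infix_iff _ _).mp (by simpa using hinf)
      have := hns ' ' this
      simp [PySem.Chars.isspace] at this
    rw [hnoin]
    rfl
  | u :: v :: rest =>
    have hklist : ∀ x ∈ List.map String.toList (u :: v :: rest), x ≠ [] ∧ ∀ c ∈ x, PySem.Chars.isspace c = false := by
      intro x hx
      obtain ⟨w, hw, rfl⟩ := List.mem_map.mp hx
      exact hk w hw
    have htj : (PySem.Str.join " " (u :: v :: rest)).toList
        = PySem.Chars.join [' '] (List.map String.toList (u :: v :: rest)) := by
      rw [PySem.Str.toList_join]; rfl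
    have hmem : ' ' ∈ (PySem.Str.join " " (u :: v :: rest)).toList := by
      rw [htj]
      simp only [List.map_cons]
      rw [PySem.Chars.join_cons_cons]
      simp
    show (if PySem.Str.join " " (u :: v :: rest) = "" then _ else _) = _
    rw [if_neg (by intro h; rw [h] at hmem; simp at hmem)]
    have hisin : PySem.Str.isIn " " (PySem.Str.join " " (u :: v :: rest)) = true := by
      rw [PySem.Str.isIn_iff_infix]
      simpa using (List.singleton_infix_iff _ _).mpr hmem
    rw [hisin]
    have hsplit : PySem.Str.split₀ (PySem.Str.join " " (u :: v :: rest)) = u :: v :: rest := by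
      apply List.map_injective_iff.mpr toList_injective'
      rw [PySem.Str.split₀_map_toList, htj]
      exact split0_join _ hklist
    rw [hsplit]
    simp

def keptA (ws : List String) : List String :=
  (PySem.List.enumerate ws).foldl
    (fun acc iw =>
      if ¬ (pvStop.contains (PySem.Str.lower iw.2) = true) ∨ (0 < iw.1 ∧ iw.1 < (ws.length : Int) - 1)
      then acc ++ [iw.2] else acc) []

def keptB (ws : List String) : List String :=
  let words1 :=
    if h : ws ≠ [] then
      if pvStop.contains (PySem.Str.lower (ws.getLast h)) then
        PySem.List.slice ws none (some (-1))
      else ws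
    else ws
  if h : words1 ≠ [] then
    if pvStop.contains (PySem.Str.lower (words1.head h)) then
      PySem.List.slice words1 (some 1) none
    else words1
  else words1

theorem keptAB (ws : List String) : keptA ws = keptB ws := by
  rcases ws with _ | ⟨a, l⟩
  · rfl
  · rcases List.eq_nil_or_concat l with rfl | ⟨mid, b, rfl⟩
    · by_cases hPa : PySem.Str.lower a ∈ pvStop
      · simp [keptA, keptB, PySem.List.enumerate, hPa, PySem.List.slice_to_neg_one]
      · simp [keptA, keptB, PySem.List.enumerate, hPa]
    · rw [List.concat_eq_append]
      have hn : ((a :: (mid ++ [b])).length : Int) = (mid.length : Int) + 2 := by simp; omega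
      have hgl : ∀ h, (a :: (mid ++ [b])).getLast h = b := by intro h; simp
      have hdl : (a :: (mid ++ [b])).dropLast = a :: mid := by
        rw [← List.cons_append, List.dropLast_concat]
      by_cases hPa : PySem.Str.lower a ∈ pvStop <;>
        by_cases hPb : PySem.Str.lower b ∈ pvStop
      all_goals {
        rw [keptA, PySem.List.enumerate_cons, List.foldl_cons]
        rw [show (0:Int) + 1 = 1 from rfl]
        rw [foldl_mid (fun w => pvStop.contains (PySem.Str.lower w)) ((a :: (mid ++ [b])).length : Int)
          mid b 1 _ (by omega) (by rw [hn]; omega)]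
        rw [keptB]
        simp [hPa, hPb, hgl, hdl, PySem.List.slice_to_neg_one, PySem.List.slice_from_one]
      }

theorem keptB_sub (ws : List String) : ∀ w ∈ keptB ws, w ∈ ws := by
  intro w hw
  unfold keptB at hw
  split_ifs at hw <;>
  · dsimp only at hw
    try split_ifs at hw
    all_goals
      try replace hw := PySem.List.mem_of_mem_slice _ _ _ hw
      try replace hw := PySem.List.mem_of_mem_slice _ _ _ hw
      exact hw

-- ===== VERDICT (by name: the statement is the Claim_ definition above) =====
theorem clean_principle_label_py_spec : Claim_equal_clean_principle_label_py := by
  intro label _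
  show clean_principle_label_py label = clean_principle_label_py_alt label
  have hA : clean_principle_label_py label =
      (let cleaned := PySem.Str.join " " (keptA (PySem.Str.split₀ label))
       if cleaned = "" then cleaned
       else if PySem.Str.isIn " " cleaned then
         PySem.Str.join " " ((PySem.Str.split₀ cleaned).map pvCapitalize)
       else if 1 < PySem.Str.len cleaned then pvUpperFirst cleaned
       else PySem.Str.upper cleaned) := rfl
  rw [hA, keptAB]
  have hk : ∀ w ∈ keptB (PySem.Str.split₀ label),
      w.toList ≠ [] ∧ ∀ c ∈ w.toList, PySem.Chars.isspace c = false :=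
    fun w hw => split0_words label w (keptB_sub _ w hw)
  exact (phase2 (keptB (PySem.Str.split₀ label)) hk).trans rfl
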